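-- pv_equiv track=rewrite | github.com/human-technology-institute/structure_learning | src/mcmc/utils/partition_utils.py | calculate_join_possibilities
-- ===== SOURCE A (Python) =====
-- def calculate_join_possibilities(n, party, posy):
--     m = len(party)
--     join_possibs = [0] * n
--     for k in range(n):
--         join_possibs[k] = m - 1
--         node_element = posy[k]
--         if party[node_element] == 1:  # Nodes in a partition element of size 1
--             if node_element < m - 1:
--                 if party[node_element + 1] == 1:  # And if the next partition element is also size 1
--                     join_possibs[k] = m - 2  # We only allow them to jump to the left to count the swap only once
--     return join_possibs
-- ===== SOURCE B (Python) =====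
-- def calculate_join_possibilities(n, party, posy):
--     m = len(party)
--     # pass 1: for each partition element e, the number of join possibilities
--     elem_val = [m - 2 if (party[e] == 1 and e < m - 1 and party[e + 1] == 1) else m - 1
--                 for e in range(m)]
--     # pass 2: assign each node its element's value
--     return [elem_val[posy[k]] for k in range(n)]
-- ===== Notes on version B (the rewrite author's own statement) =====
-- stated objective: alternative
-- what changed: B replaces A's single inlined loop over nodes (computing the join count per node) by two differently-shaped passes: a table elem_val over the m partition elements, then a lookup pass over the n nodes.
-- intended difference: When some posy[k] (k < n) equals -1 and both the first and last entries of party are 1, A's party[node_element + 1] wraps around to party[0] and A reports m-2 (even -1 when m=1), while B reports m-1, the intended count for the last partition element, which has no successor to join. — e.g. on calculate_join_possibilities(1, [1], [-1]): A returns [-1], B returns [0]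
import Mathlib
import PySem

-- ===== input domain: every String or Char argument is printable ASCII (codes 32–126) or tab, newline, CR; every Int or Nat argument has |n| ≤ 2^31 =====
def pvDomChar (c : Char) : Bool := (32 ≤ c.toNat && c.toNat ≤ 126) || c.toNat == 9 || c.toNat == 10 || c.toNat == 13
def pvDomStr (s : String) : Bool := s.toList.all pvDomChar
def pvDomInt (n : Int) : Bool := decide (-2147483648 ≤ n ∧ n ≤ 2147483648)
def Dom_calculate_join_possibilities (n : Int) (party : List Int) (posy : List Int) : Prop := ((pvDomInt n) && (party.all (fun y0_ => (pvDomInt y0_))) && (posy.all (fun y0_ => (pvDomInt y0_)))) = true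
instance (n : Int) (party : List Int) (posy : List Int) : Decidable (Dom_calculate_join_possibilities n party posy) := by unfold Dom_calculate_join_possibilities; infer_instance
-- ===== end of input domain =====

-- B splits A's single per-node loop into a per-element table pass plus a per-node lookup pass (objective: alternative decomposition).

-- ===== PORT A =====
def calculate_join_possibilities (n : Int) (party : List Int) (posy : List Int) : List Int :=
  let m : Int := party.length
  let join_possibs : List Int := List.replicate n.toNat 0
  (PySem.List.pyRange 0 n 1).foldl (fun jp k =>
    let jp := PySem.List.pySetD jp k (m - 1)
    let node_element := PySem.List.pyGetD posy k 0
    if PySem.List.pyGetD party node_element 0 = 1 then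
      if node_element < m - 1 then
        if PySem.List.pyGetD party (node_element + 1) 0 = 1 then
          PySem.List.pySetD jp k (m - 2)
        else jp
      else jp
    else jp) join_possibs

-- ===== PORT B =====
def calculate_join_possibilities_alt (n : Int) (party : List Int) (posy : List Int) : List Int :=
  let m : Int := party.length
  let elem_val : List Int := (PySem.List.pyRange 0 m 1).map (fun e =>
    if PySem.List.pyGetD party e 0 = 1 ∧ e < m - 1 ∧ PySem.List.pyGetD party (e + 1) 0 = 1
    then m - 2 else m - 1)
  (PySem.List.pyRange 0 n 1).map (fun k =>
    PySem.List.pyGetD elem_val (PySem.List.pyGetD posy k 0) 0)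

-- ===== PRECONDITION & SPEC =====
-- Pre_ excludes exactly the inputs on which A raises IndexError: n beyond len(posy),
-- or some posy[k] (k < n) not a valid (possibly negative) index into party.
def Pre_calculate_join_possibilities (n : Int) (party : List Int) (posy : List Int) : Prop :=
  n ≤ posy.length ∧ ∀ e ∈ posy.take n.toNat, -(party.length : Int) ≤ e ∧ e < party.length
instance (n : Int) (party : List Int) (posy : List Int) : Decidable (Pre_calculate_join_possibilities n party posy) := by unfold Pre_calculate_join_possibilities; infer_instance
def pvWitness_calculate_join_possibilities : Int × List Int × List Int := (3, [1, 2, 1], [0, 2, 1])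

-- When some posy[k] (k < n) equals -1 and both the first and last entries of party are 1,
-- A's party[node_element + 1] wraps around to party[0] and A reports m-2 (even -1 when m=1),
-- while B reports m-1, the intended count for the last partition element, which has no successor to join.
def D_calculate_join_possibilities (n : Int) (party : List Int) (posy : List Int) : Prop :=
  (-1 : Int) ∈ posy.take n.toNat ∧ party.head? = some 1 ∧ party.getLast? = some 1
instance (n : Int) (party : List Int) (posy : List Int) : Decidable (D_calculate_join_possibilities n party posy) := by unfold D_calculate_join_possibilities; infer_instance

def Spec_calculate_join_possibilities (n : Int) (party : List Int) (posy : List Int) (out : List Int) : Prop := ¬ D_calculate_join_possibilities n party posy → out = calculate_join_possibilities_alt n party posy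
instance (n : Int) (party : List Int) (posy : List Int) (out : List Int) : Decidable (Spec_calculate_join_possibilities n party posy out) := by unfold Spec_calculate_join_possibilities; infer_instance

def pvDiffWitness_calculate_join_possibilities : Int × List Int × List Int := (1, [1], [-1])
def pvDiffWitnessOut_calculate_join_possibilities : (List Int) × (List Int) := ([-1], [0])

-- ===== CLAIM (what is proved, stated in full; the proofs are below) =====
def Claim_unchanged_calculate_join_possibilities : Prop := ∀ (n : Int) (party : List Int) (posy : List Int), Dom_calculate_join_possibilities n party posy → Pre_calculate_join_possibilities n party posy → Spec_calculate_join_possibilities n party posy (calculate_join_possibilities n party posy)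
def Claim_changed_calculate_join_possibilities : Prop := Dom_calculate_join_possibilities (pvDiffWitness_calculate_join_possibilities.1) (pvDiffWitness_calculate_join_possibilities.2.1) (pvDiffWitness_calculate_join_possibilities.2.2) ∧ Pre_calculate_join_possibilities (pvDiffWitness_calculate_join_possibilities.1) (pvDiffWitness_calculate_join_possibilities.2.1) (pvDiffWitness_calculate_join_possibilities.2.2) ∧ D_calculate_join_possibilities (pvDiffWitness_calculate_join_possibilities.1) (pvDiffWitness_calculate_join_possibilities.2.1) (pvDiffWitness_calculate_join_possibilities.2.2) ∧ calculate_join_possibilities (pvDiffWitness_calculate_join_possibilities.1) (pvDiffWitness_calculate_join_possibilities.2.1) (pvDiffWitness_calculate_join_possibilities.2.2) = pvDiffWitnessOut_calculate_join_possibilities.1 ∧ calculate_join_possibilities_alt (pvDiffWitness_calculate_join_possibilities.1) (pvDiffWitness_calculate_join_possibilities.2.1) (pvDiffWitness_calculate_join_possibilities.2.2) = pvDiffWitnessOut_calculate_join_possibilities.2 ∧ pvDiffWitnessOut_calculate_join_possibilities.1 ≠ pvDiffWitnessOut_calculate_join_possibilities.2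
def Claim_exact_calculate_join_possibilities : Prop := ∀ (n : Int) (party : List Int) (posy : List Int), Dom_calculate_join_possibilities n party posy → Pre_calculate_join_possibilities n party posy → D_calculate_join_possibilities n party posy → calculate_join_possibilities n party posy ≠ calculate_join_possibilities_alt n party posy


-- ===== LEMMAS AND PROOFS =====

-- Net value A's loop body stores at index k.
def pvAval (party posy : List Int) (k : Int) : Int :=
  let m : Int := party.length
  let e := PySem.List.pyGetD posy k 0
  if PySem.List.pyGetD party e 0 = 1 ∧ e < m - 1 ∧ PySem.List.pyGetD party (e + 1) 0 = 1
  then m - 2 else m - 1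

-- The table entry B builds, as a function of the element index.
def pvBfun (party : List Int) (e : Int) : Int :=
  let m : Int := party.length
  if PySem.List.pyGetD party e 0 = 1 ∧ e < m - 1 ∧ PySem.List.pyGetD party (e + 1) 0 = 1
  then m - 2 else m - 1

-- Value B assigns to node k.
def pvBval (party posy : List Int) (k : Int) : Int :=
  PySem.List.pyGetD ((PySem.List.pyRange 0 (party.length : Int) 1).map (pvBfun party))
    (PySem.List.pyGetD posy k 0) 0

lemma pvB_eq_map (n : Int) (party posy : List Int) :
    calculate_join_possibilities_alt n party posy =
      (PySem.List.pyRange 0 n 1).map (pvBval party posy) := rfl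

lemma pvStep_eq (party posy jp : List Int) (k : Int) (hk : 0 ≤ k) :
    (fun jp k =>
      let jp' := PySem.List.pySetD jp k ((party.length : Int) - 1)
      let node_element := PySem.List.pyGetD posy k 0
      if PySem.List.pyGetD party node_element 0 = 1 then
        if node_element < (party.length : Int) - 1 then
          if PySem.List.pyGetD party (node_element + 1) 0 = 1 then
            PySem.List.pySetD jp' k ((party.length : Int) - 2)
          else jp'
        else jp'
      else jp') jp k = PySem.List.pySetD jp k (pvAval party posy k) := by
  have hset : ∀ (xs : List Int) (v : Int), PySem.List.pySetD xs k v = xs.set k.toNat v :=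
    fun xs v => PySem.List.pySetD_of_nonneg xs v hk
  simp only [pvAval, hset, List.set_set]
  split_ifs with h1 h2 h3 <;> simp_all

lemma pvFoldl_set (f : Int → Int) (N : Nat) :
    ∀ (i : Nat), i ≤ N →
      (PySem.List.pyRange 0 (i : Int) 1).foldl
          (fun acc k => PySem.List.pySetD acc k (f k)) (List.replicate N 0) =
        (PySem.List.pyRange 0 (i : Int) 1).map f ++ List.replicate (N - i) (0 : Int) := by
  intro i
  induction i with
  | zero => intro _; simp [PySem.List.pyRange_one_eq_nil]
  | succ i ih =>
      intro hle
      have h1 : (0 : Int) ≤ (i : Int) := by positivity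
      have hsplit : PySem.List.pyRange 0 ((i : Int) + 1) 1 =
          PySem.List.pyRange 0 (i : Int) 1 ++ [(i : Int)] := by
        simpa using PySem.List.pyRange_one_succ_right h1
      have hcast : ((i + 1 : Nat) : Int) = (i : Int) + 1 := by push_cast; ring
      rw [hcast, hsplit, List.foldl_append, List.map_append, ih (by omega)]
      simp only [List.foldl_cons, List.foldl_nil]
      rw [PySem.List.pySetD_of_nonneg _ _ h1]
      have hlenmap : ((PySem.List.pyRange 0 (i : Int) 1).map f).length = i := by
        simp [PySem.List.length_pyRange_one]
      have hrep : List.replicate (N - i) (0 : Int) = 0 :: List.replicate (N - (i + 1)) 0 := by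
        rw [show N - i = (N - (i + 1)) + 1 by omega, List.replicate_succ]
      rw [hrep, show ((i : Int)).toNat = i from Int.toNat_natCast i,
        List.set_append_right _ _ (by omega)]
      simp [hlenmap]

lemma pvA_eq_map (n : Int) (party posy : List Int) :
    calculate_join_possibilities n party posy =
      (PySem.List.pyRange 0 n 1).map (pvAval party posy) := by
  unfold calculate_join_possibilities
  by_cases hn : n ≤ 0
  · simp [PySem.List.pyRange_one_eq_nil hn, show n.toNat = 0 by omega]
  · have hcong :
        (PySem.List.pyRange 0 n 1).foldl (fun jp k =>
          let jp' := PySem.List.pySetD jp k ((party.length : Int) - 1)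
          let node_element := PySem.List.pyGetD posy k 0
          if PySem.List.pyGetD party node_element 0 = 1 then
            if node_element < (party.length : Int) - 1 then
              if PySem.List.pyGetD party (node_element + 1) 0 = 1 then
                PySem.List.pySetD jp' k ((party.length : Int) - 2)
              else jp'
            else jp'
          else jp') (List.replicate n.toNat 0) =
        (PySem.List.pyRange 0 n 1).foldl
          (fun acc k => PySem.List.pySetD acc k (pvAval party posy k))
          (List.replicate n.toNat 0) := by
      apply PySem.List.foldl_congr_mem
      intro acc k hk
      exact pvStep_eq party posy acc k (PySem.List.mem_pyRange_one.1 hk).1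
    have hcast : n = ((n.toNat : Nat) : Int) := by omega
    rw [hcong, hcast]
    simpa only [Nat.sub_self, List.replicate_zero, List.append_nil]
      using pvFoldl_set (pvAval party posy) n.toNat n.toNat le_rfl

-- getting the table entry for a NONNEGATIVE element index
lemma pvBval_table (party : List Int) (e : Int) (h0 : 0 ≤ e) (hm : e < (party.length : Int)) :
    PySem.List.pyGetD ((PySem.List.pyRange 0 (party.length : Int) 1).map (pvBfun party)) e 0 =
      pvBfun party e :=
  PySem.List.pyGetD_map_pyRange_of_nonneg _ _ _ _ h0 hm

-- getting the table entry for a NEGATIVE element index: wraps to index m + e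
lemma pvBval_table_neg (party : List Int) (e : Int) (h0 : e < 0)
    (hm : -(party.length : Int) ≤ e) :
    PySem.List.pyGetD ((PySem.List.pyRange 0 (party.length : Int) 1).map (pvBfun party)) e 0 =
      pvBfun party ((party.length : Int) + e) := by
  have hk : e = -(((-e).toNat : Nat) : Int) := by omega
  have hlen : ((PySem.List.pyRange 0 (party.length : Int) 1).map (pvBfun party)).length
      = party.length := by simp [PySem.List.length_pyRange_one]
  rw [hk, PySem.List.pyGetD_neg_natCast _ _ _ (by omega) (by omega)]
  rw [List.getElem_map, PySem.List.getElem_pyRange_one]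
  congr 1
  rw [hlen]
  omega

lemma pvParty_neg (party : List Int) (e : Int) (h0 : e < 0)
    (hm : -(party.length : Int) ≤ e) :
    PySem.List.pyGetD party e 0 =
      PySem.List.pyGetD party ((party.length : Int) + e) 0 := by
  have hk : e = -(((-e).toNat : Nat) : Int) := by omega
  rw [hk, PySem.List.pyGetD_neg_natCast _ _ _ (by omega) (by omega),
    PySem.List.pyGetD_eq_getElem _ _ (by omega) (by omega)]
  congr 1
  omega

-- the element index B looks up for node k is posy[k], which Pre_ puts in [-m, m)
lemma pvPosy_mem (n : Int) (party posy : List Int)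
    (hpre : Pre_calculate_join_possibilities n party posy)
    (k : Int) (hk0 : 0 ≤ k) (hkn : k < n) :
    PySem.List.pyGetD posy k 0 ∈ posy.take n.toNat ∧
      -(party.length : Int) ≤ PySem.List.pyGetD posy k 0 ∧
      PySem.List.pyGetD posy k 0 < (party.length : Int) := by
  obtain ⟨hlen, hall⟩ := hpre
  have hklen : k.toNat < posy.length := by omega
  have hmem : PySem.List.pyGetD posy k 0 ∈ posy.take n.toNat := by
    rw [PySem.List.pyGetD_eq_getElem _ _ hk0 (by omega)]
    have h' : k.toNat < (posy.take n.toNat).length := by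
      simp [List.length_take]; omega
    rw [show posy[k.toNat] = (posy.take n.toNat)[k.toNat]'h' from (List.getElem_take).symm]
    exact List.getElem_mem h'
  exact ⟨hmem, (hall _ hmem).1, (hall _ hmem).2⟩

-- pointwise agreement outside D_
lemma pvPointwise (n : Int) (party posy : List Int)
    (hpre : Pre_calculate_join_possibilities n party posy)
    (hnd : ¬ D_calculate_join_possibilities n party posy)
    (k : Int) (hk0 : 0 ≤ k) (hkn : k < n) :
    pvAval party posy k = pvBval party posy k := by
  obtain ⟨hmem, hlo, hhi⟩ := pvPosy_mem n party posy hpre k hk0 hkn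
  set e := PySem.List.pyGetD posy k 0 with he
  have hm1 : 1 ≤ (party.length : Int) := by omega
  have hnonempty : party ≠ [] := by
    intro hnil; subst hnil; simp at hm1
  by_cases h0 : 0 ≤ e
  · -- nonnegative index: the table entry is literally A's formula
    unfold pvBval
    rw [← he, pvBval_table party e h0 hhi]
    rfl
  · by_cases hne1 : e = -1
    · -- e = -1 : A wraps the successor to party[0]; outside D_ both give m - 1
      have hD' : ¬ (party.head? = some 1 ∧ party.getLast? = some 1) := by
        intro hcontra
        exact hnd ⟨hne1 ▸ hmem, hcontra.1, hcontra.2⟩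
      unfold pvBval
      rw [← he, hne1, pvBval_table_neg party (-1) (by omega) (by omega)]
      unfold pvAval pvBfun
      rw [← he, hne1]
      have hlast : PySem.List.pyGetD party (-1) 0 = party.getLast hnonempty :=
        PySem.List.pyGetD_neg_one party 0 hnonempty
      have hhead : PySem.List.pyGetD party ((-1) + 1) 0 = party.getD 0 0 := by
        norm_num [PySem.List.pyGetD_zero]
      simp only []
      split_ifs with hA hB hB'
      · rfl
      · exfalso
        apply hD'
        constructor
        · have h2 := hA.2.2
          rw [hhead] at h2
          cases party with
          | nil => exact absurd rfl hnonempty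
          | cons a l => simpa using h2
        · have hl1 : party.getLast hnonempty = 1 := by rw [← hlast]; exact hA.1
          simp [List.getLast?_eq_some_getLast hnonempty, hl1]
      · exfalso
        have h2 := hB'.2.1
        omega
      · rfl
    · -- e ≤ -2 : both wrap identically to an index j = m + e < m - 1
      unfold pvBval
      rw [← he, pvBval_table_neg party e (by omega) (by omega)]
      unfold pvAval pvBfun
      rw [← he]
      have hA1 : PySem.List.pyGetD party e 0 =
          PySem.List.pyGetD party ((party.length : Int) + e) 0 :=
        pvParty_neg party e (by omega) (by omega)
      have hA2 : PySem.List.pyGetD party (e + 1) 0 =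
          PySem.List.pyGetD party ((party.length : Int) + e + 1) 0 := by
        rw [pvParty_neg party (e + 1) (by omega) (by omega)]
        ring_nf
      simp only []
      rw [hA1, hA2]
      have he_lt : e < (party.length : Int) - 1 := by omega
      have hj_lt : (party.length : Int) + e < (party.length : Int) - 1 := by omega
      split_ifs with hA hB hB'
      · rfl
      · exact absurd ⟨hA.1, hj_lt, hA.2.2⟩ hB
      · exact absurd ⟨hB'.1, he_lt, hB'.2.2⟩ hA
      · rfl

-- ===== VERDICT (by name: the statement is the Claim_ definition above) =====
theorem calculate_join_possibilities_spec : Claim_unchanged_calculate_join_possibilities := by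
  intro n party posy _ hpre
  unfold Spec_calculate_join_possibilities
  intro hnd
  rw [pvA_eq_map, pvB_eq_map]
  apply List.map_congr_left
  intro k hk
  obtain ⟨hk0, hkn⟩ := PySem.List.mem_pyRange_one.1 hk
  exact pvPointwise n party posy hpre hnd k hk0 hkn

theorem calculate_join_possibilities_changed : Claim_changed_calculate_join_possibilities := by
  unfold Claim_changed_calculate_join_possibilities; decide

theorem calculate_join_possibilities_tight : Claim_exact_calculate_join_possibilities := by
  intro n party posy _ hpre hd heq
  obtain ⟨hmem, hhead, hlast⟩ := hd
  obtain ⟨i, hi, hget⟩ := List.getElem_of_mem hmem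
  have hi_n : i < n.toNat := by
    have h' := hi; simp [List.length_take] at h'; omega
  have hi_posy : i < posy.length := by
    have h' := hi; simp [List.length_take] at h'; omega
  have hposy_i : posy[i] = -1 := by
    rw [← List.getElem_take (j := n.toNat) (h := hi)]
    exact hget
  have hnonempty : party ≠ [] := by
    intro hnil; subst hnil; simp at hhead
  have hm1 : 1 ≤ (party.length : Int) := by
    cases party with
    | nil => exact absurd rfl hnonempty
    | cons a l => simp
  rw [pvA_eq_map, pvB_eq_map] at heq
  have hir : i < (PySem.List.pyRange 0 n 1).length := by
    rw [PySem.List.length_pyRange_one]; omega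
  have hri : (PySem.List.pyRange 0 n 1)[i] = (i : Int) := by
    rw [PySem.List.getElem_pyRange_one]; ring
  have heqi : pvAval party posy (i : Int) = pvBval party posy (i : Int) := by
    have hq := congrArg (fun l => l[i]?) heq
    simp only [List.getElem?_map, List.getElem?_eq_getElem hir, Option.map_some, hri,
      Option.some_inj] at hq
    exact hq
  have hgete : PySem.List.pyGetD posy (i : Int) 0 = -1 := by
    rw [PySem.List.pyGetD_eq_getElem _ _ (by omega) (by omega)]
    simpa using hposy_i
  have hlastv : PySem.List.pyGetD party (-1) 0 = 1 := by
    rw [PySem.List.pyGetD_neg_one party 0 hnonempty]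
    rw [List.getLast?_eq_some_getLast hnonempty] at hlast
    exact Option.some_inj.1 hlast
  have hheadv : PySem.List.pyGetD party ((-1) + 1) 0 = 1 := by
    norm_num [PySem.List.pyGetD_zero]
    cases party with
    | nil => exact absurd rfl hnonempty
    | cons a l => simpa using hhead
  have hAv : pvAval party posy (i : Int) = (party.length : Int) - 2 := by
    unfold pvAval
    rw [hgete]
    simp only []
    rw [if_pos ⟨hlastv, by omega, hheadv⟩]
  have hBv : pvBval party posy (i : Int) = (party.length : Int) - 1 := by
    unfold pvBval
    rw [hgete, pvBval_table_neg party (-1) (by omega) (by omega)]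
    unfold pvBfun
    simp only []
    rw [if_neg]
    intro hcontra
    have h2 := hcontra.2.1
    omega
  rw [hAv, hBv] at heqi
  omega
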